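-- pv_equiv track=rewrite | github.com/shaiberman/BloodPilot | dmstudies/utils.py | get_pairingIndices
-- ===== SOURCE A (Python) =====
-- def get_pairingIndices(pairDiff, nStim):
--     pairingIndices = []
--     for x in pairDiff:
--         stimUsed = resetStimUsed(
--             nStim)  # keep track of whether stimulus has been used in a pairing for this difference already
--         for i in range(0, nStim - x):
--             if stimUsed[i] == False:
--                 pairingIndices.append([i, i + x])
--                 stimUsed[i] = True
--                 stimUsed[i + x] = True
--     return pairingIndices
--
-- def resetStimUsed(nStim):
--     stimUsed = {}
--     for i in range(0, nStim):
--         stimUsed[i] = False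
--     return stimUsed
-- ===== SOURCE B (Python) =====
-- def get_pairingIndices(pairDiff, nStim):
--     # Closed-form pairing: for difference x the greedy used-table pairs exactly the
--     # indices whose offset within each 2*x block is < x; no mutable table needed.
--     out = []
--     for x in pairDiff:
--         if x == 0:
--             out += [[i, i] for i in range(nStim)]
--         elif x > 0:
--             out += [[i, i + x] for i in range(nStim - x) if i % (2 * x) < x]
--     return out
-- ===== Notes on version B (the rewrite author's own statement) =====
-- stated objective: simpler
-- what changed: B replaces A's mutable stimUsed dictionary and skip-if-used scan by a closed-form arithmetic test: for difference x>0 index i is paired exactly when i % (2*x) < x, so each x becomes a single list comprehension (x == 0 emits [i,i] for every i).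
import Mathlib
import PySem

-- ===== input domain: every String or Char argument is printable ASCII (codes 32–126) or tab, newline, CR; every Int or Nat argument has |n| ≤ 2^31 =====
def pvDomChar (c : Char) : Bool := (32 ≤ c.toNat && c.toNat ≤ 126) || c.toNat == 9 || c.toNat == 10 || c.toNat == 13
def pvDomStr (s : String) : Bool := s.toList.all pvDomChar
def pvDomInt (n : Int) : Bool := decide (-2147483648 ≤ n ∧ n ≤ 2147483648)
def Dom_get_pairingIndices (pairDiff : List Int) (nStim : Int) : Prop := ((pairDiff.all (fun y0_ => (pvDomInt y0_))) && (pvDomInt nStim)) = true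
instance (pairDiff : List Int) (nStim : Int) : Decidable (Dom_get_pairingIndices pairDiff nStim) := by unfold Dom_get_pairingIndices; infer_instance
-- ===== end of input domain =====

-- B replaces A's mutable used-table by the closed-form test i % (2*x) < x (objective: simpler).

-- ===== PORT A =====
def resetStimUsedP (nStim : Int) : PySem.Dict Int Bool :=
  (PySem.List.pyRange 0 nStim 1).foldl (fun d i => d.insert i false) PySem.Dict.empty

def get_pairingIndices (pairDiff : List Int) (nStim : Int) : List (List Int) :=
  pairDiff.foldl (fun pairingIndices x =>
    ((PySem.List.pyRange 0 (nStim - x) 1).foldl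
      (fun s i =>
        match s.2.get? i with  -- stimUsed[i]; the KeyError case (none) is excluded by Pre_
        | some false => (s.1 ++ [[i, i + x]], (s.2.insert i true).insert (i + x) true)
        | _ => s)
      (pairingIndices, resetStimUsedP nStim)).1) []

-- ===== PORT B =====
def get_pairingIndices_alt (pairDiff : List Int) (nStim : Int) : List (List Int) :=
  pairDiff.foldl (fun out x =>
    if x = 0 then out ++ (PySem.List.pyRange 0 nStim 1).map (fun i => [i, i])
    else if 0 < x then
      out ++ ((PySem.List.pyRange 0 (nStim - x) 1).filter
                (fun i => decide (PySem.Int.mod i (2 * x) < x))).map (fun i => [i, i + x])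
    else out) []

-- ===== PRECONDITION & SPEC =====
-- Pre_ admits exactly the inputs on which A returns: a difference x < min(0, nStim) makes A read a key outside the table (KeyError).
def Pre_get_pairingIndices (pairDiff : List Int) (nStim : Int) : Prop :=
  ∀ x ∈ pairDiff, min 0 nStim ≤ x
instance (pairDiff : List Int) (nStim : Int) : Decidable (Pre_get_pairingIndices pairDiff nStim) := by unfold Pre_get_pairingIndices; infer_instance

def pvWitness_get_pairingIndices : List Int × Int := ([1, 0, 2], 5)

def Spec_get_pairingIndices (pairDiff : List Int) (nStim : Int) (out : List (List Int)) : Prop := out = get_pairingIndices_alt pairDiff nStim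
instance (pairDiff : List Int) (nStim : Int) (out : List (List Int)) : Decidable (Spec_get_pairingIndices pairDiff nStim out) := by unfold Spec_get_pairingIndices; infer_instance

-- ===== CLAIM (what is proved, stated in full; the proofs are below) =====
def Claim_equal_get_pairingIndices : Prop := ∀ (pairDiff : List Int) (nStim : Int), Dom_get_pairingIndices pairDiff nStim → Pre_get_pairingIndices pairDiff nStim → Spec_get_pairingIndices pairDiff nStim (get_pairingIndices pairDiff nStim)

-- ===== LEMMAS AND PROOFS =====

-- k % m stays ≤ k for nonnegative k, positive m
theorem pvModLe (k m : Int) (hk : 0 ≤ k) (hm : 0 < m) : k % m ≤ k := by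
  rcases lt_or_ge k m with h | h
  · rw [Int.emod_eq_of_lt hk h]
  · have := Int.emod_lt_of_pos k hm
    omega

-- adding x shifts the residue mod 2x across the half-block boundary
theorem pvModAdd (x k : Int) (hx : 0 < x) :
    (k + x) % (2 * x) = if k % (2 * x) < x then k % (2 * x) + x else k % (2 * x) - x := by
  have h2x : 0 < 2 * x := by omega
  have hr0 : 0 ≤ k % (2 * x) := Int.emod_nonneg k (by omega)
  have hr1 : k % (2 * x) < 2 * x := Int.emod_lt_of_pos k h2x
  have hk : k = 2 * x * (k / (2 * x)) + k % (2 * x) := (Int.mul_ediv_add_emod k (2 * x)).symm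
  by_cases h : k % (2 * x) < x
  · rw [if_pos h]
    have hq : k + x = k % (2 * x) + x + 2 * x * (k / (2 * x)) := by linarith [hk]
    rw [hq, Int.add_mul_emod_self_left]
    exact Int.emod_eq_of_lt (by omega) (by omega)
  · rw [if_neg h]
    have hq : k + x = k % (2 * x) - x + 2 * x * (k / (2 * x) + 1) := by linarith [hk]
    rw [hq, Int.add_mul_emod_self_left]
    exact Int.emod_eq_of_lt (by omega) (by omega)

-- the dict built by resetStimUsed maps exactly 0..n-1 to false
theorem pvResetAux (j : Int) : ∀ (K : Nat) (d : PySem.Dict Int Bool),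
    ((PySem.List.pyRange 0 (K : Int) 1).foldl (fun d i => d.insert i false) d).get? j
      = if 0 ≤ j ∧ j < (K : Int) then some false else d.get? j := by
  intro K
  induction K with
  | zero => intro d; simp [PySem.List.pyRange_one_eq_nil]
  | succ K ih =>
    intro d
    rw [show ((K + 1 : Nat) : Int) = (K : Int) + 1 by push_cast; ring,
        PySem.List.pyRange_one_succ_right (by positivity), List.foldl_append]
    simp only [List.foldl_cons, List.foldl_nil]
    rw [PySem.Dict.get?_insert, ih]
    split_ifs <;> first | rfl | omega

theorem pvResetGet (n j : Int) : (resetStimUsedP n).get? j = if 0 ≤ j ∧ j < n then some false else none := by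
  unfold resetStimUsedP
  rcases lt_or_ge 0 n with h | h
  · have : n = ((n.toNat : Nat) : Int) := by omega
    rw [this, pvResetAux]
    rw [PySem.Dict.get?_empty]
  · rw [PySem.List.pyRange_one_eq_nil h]
    simp [PySem.Dict.get?_empty]
    omega

-- the state of A's used-table after k iterations of the inner loop (difference x > 0)
def pvUsed (x n k j : Int) : Option Bool :=
  if 0 ≤ j ∧ j < n then
    some (decide ((j < k ∧ j % (2 * x) < x) ∨ (x ≤ j ∧ j - x < k ∧ x ≤ j % (2 * x))))
  else none

-- invariant of A's inner loop for x > 0: output = the residue-filtered prefix, dict = pvUsed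
theorem pvInnerPos (x n : Int) (hx : 0 < x) (acc : List (List Int)) :
    ∀ (K : Nat), (K : Int) ≤ n - x →
    ∃ d' : PySem.Dict Int Bool,
      (PySem.List.pyRange 0 (K : Int) 1).foldl
        (fun s i => match s.2.get? i with
          | some false => (s.1 ++ [[i, i + x]], (s.2.insert i true).insert (i + x) true)
          | _ => s) (acc, resetStimUsedP n)
      = (acc ++ ((PySem.List.pyRange 0 (K : Int) 1).filter (fun i => decide (i % (2 * x) < x))).map (fun i => [i, i + x]), d')
      ∧ ∀ j, d'.get? j = pvUsed x n (K : Int) j := by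
  intro K
  induction K with
  | zero =>
    intro _
    refine ⟨resetStimUsedP n, ?_, ?_⟩
    · simp [PySem.List.pyRange_one_eq_nil]
    · intro j
      rw [pvResetGet, pvUsed]
      split_ifs with hj
      · simp only [Option.some.injEq]
        symm
        rw [decide_eq_false_iff_not]
        rintro (⟨h1, _⟩ | ⟨h1, h2, _⟩) <;> omega
      · rfl
  | succ K ih =>
    intro hK
    have hK' : (K : Int) ≤ n - x := by push_cast at hK ⊢; omega
    obtain ⟨d', hfold, hget⟩ := ih hK'
    have hcast : ((K + 1 : Nat) : Int) = (K : Int) + 1 := by push_cast; ring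
    rw [hcast, PySem.List.pyRange_one_succ_right (by positivity), List.foldl_append, hfold]
    simp only [List.foldl_cons, List.foldl_nil, List.filter_append, List.map_append]
    have hrange : 0 ≤ (K : Int) ∧ (K : Int) < n := by push_cast at hK; omega
    have hreadv := hget (K : Int)
    rw [pvUsed, if_pos hrange] at hreadv
    have hmodle : (K : Int) % (2 * x) ≤ (K : Int) := pvModLe _ _ (by omega) (by omega)
    have hmod0 : 0 ≤ (K : Int) % (2 * x) := Int.emod_nonneg _ (by omega)
    have hmodlt : (K : Int) % (2 * x) < 2 * x := Int.emod_lt_of_pos _ (by omega)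
    by_cases hc : (K : Int) % (2 * x) < x
    · -- index K is free: it gets paired
      have hread : d'.get? (K : Int) = some false := by
        rw [hreadv]
        congr 1
        rw [decide_eq_false_iff_not]
        rintro (⟨h1, _⟩ | ⟨_, _, h3⟩) <;> omega
      rw [hread]
      refine ⟨(d'.insert (K : Int) true).insert ((K : Int) + x) true, ?_, ?_⟩
      · rw [List.filter_cons_of_pos (by simpa using hc)]
        simp [List.append_assoc]
      · intro j
        rw [PySem.Dict.get?_insert, PySem.Dict.get?_insert, hget j]
        have hmK := pvModAdd x (K : Int) hx
        rw [if_pos hc] at hmK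
        by_cases hj1 : j = (K : Int) + x
        · subst hj1
          rw [if_pos rfl, pvUsed, if_pos (by constructor <;> omega)]
          simp only [Option.some.injEq]
          symm
          rw [decide_eq_true_eq]
          right
          refine ⟨by omega, by omega, ?_⟩
          rw [hmK]
          omega

        · rw [if_neg hj1]
          by_cases hj2 : j = (K : Int)
          · subst hj2
            rw [if_pos rfl, pvUsed, if_pos hrange]
            simp only [Option.some.injEq]
            symm
            rw [decide_eq_true_eq]
            left
            exact ⟨by omega, hc⟩
          · rw [if_neg hj2, pvUsed, pvUsed]
            split_ifs with hj
            · simp only [Option.some.injEq, decide_eq_decide]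
              generalize j % (2 * x) = r
              constructor <;> rintro (⟨h1, h2⟩ | ⟨h1, h2, h3⟩) <;> [skip; skip; skip; skip] <;>
                first
                | exact Or.inl ⟨by omega, h2⟩
                | exact Or.inr ⟨h1, by omega, h3⟩
            · rfl
    · -- index K was already used as right partner: skipped
      have hread : d'.get? (K : Int) = some true := by
        rw [hreadv]
        congr 1
        rw [decide_eq_true_eq]
        right
        exact ⟨by omega, by omega, by omega⟩
      rw [hread]
      refine ⟨d', ?_, ?_⟩
      · rw [List.filter_cons_of_neg (by simpa using hc)]
        simp
      · intro j
        rw [hget j, pvUsed, pvUsed]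
        have hmK := pvModAdd x (K : Int) hx
        rw [if_neg hc] at hmK
        by_cases hj1 : j = (K : Int) + x
        · subst hj1
          split_ifs with hj
          · simp only [Option.some.injEq, decide_eq_decide]
            rw [hmK]
            constructor <;> rintro (⟨h1, h2⟩ | ⟨h1, h2, h3⟩) <;> omega
          · rfl
        · split_ifs with hj
          · simp only [Option.some.injEq, decide_eq_decide]
            by_cases hj2 : j = (K : Int)
            · subst hj2
              constructor <;> rintro (⟨h1, h2⟩ | ⟨h1, h2, h3⟩) <;> omega
            · generalize j % (2 * x) = r
              constructor <;> rintro (⟨h1, h2⟩ | ⟨h1, h2, h3⟩) <;>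
                first
                | exact Or.inl ⟨by omega, h2⟩
                | exact Or.inr ⟨h1, by omega, h3⟩
          · rfl

-- invariant of A's inner loop for x = 0: every index pairs with itself
theorem pvInnerZero (n : Int) (acc : List (List Int)) :
    ∀ (K : Nat), (K : Int) ≤ n →
    ∃ d' : PySem.Dict Int Bool,
      (PySem.List.pyRange 0 (K : Int) 1).foldl
        (fun s i => match s.2.get? i with
          | some false => (s.1 ++ [[i, i + 0]], (s.2.insert i true).insert (i + 0) true)
          | _ => s) (acc, resetStimUsedP n)
      = (acc ++ (PySem.List.pyRange 0 (K : Int) 1).map (fun i => [i, i + 0]), d')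
      ∧ ∀ j, d'.get? j = if 0 ≤ j ∧ j < n then some (decide (j < (K : Int))) else none := by
  intro K
  induction K with
  | zero =>
    intro _
    refine ⟨resetStimUsedP n, by simp [PySem.List.pyRange_one_eq_nil], ?_⟩
    intro j
    rw [pvResetGet]
    split_ifs with hj
    · simp only [Option.some.injEq]
      symm
      rw [decide_eq_false_iff_not]
      omega
    · rfl
  | succ K ih =>
    intro hK
    have hK' : (K : Int) ≤ n := by push_cast at hK ⊢; omega
    obtain ⟨d', hfold, hget⟩ := ih hK'
    have hcast : ((K + 1 : Nat) : Int) = (K : Int) + 1 := by push_cast; ring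
    rw [hcast, PySem.List.pyRange_one_succ_right (by positivity), List.foldl_append, hfold]
    simp only [List.foldl_cons, List.foldl_nil, List.map_append]
    have hrange : 0 ≤ (K : Int) ∧ (K : Int) < n := by push_cast at hK; omega
    have hread : d'.get? (K : Int) = some false := by
      rw [hget (K : Int), if_pos hrange]
      simp
    rw [hread]
    refine ⟨(d'.insert (K : Int) true).insert ((K : Int) + 0) true, by simp [List.append_assoc], ?_⟩
    intro j
    rw [PySem.Dict.get?_insert, PySem.Dict.get?_insert, hget j]
    by_cases hj1 : j = (K : Int) + 0
    · subst hj1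
      rw [if_pos rfl, if_pos (by constructor <;> omega)]
      simp only [Option.some.injEq]
      symm
      rw [decide_eq_true_eq]
      omega
    · rw [if_neg hj1, if_neg (by omega)]
      split_ifs with hj
      · simp only [Option.some.injEq, decide_eq_decide]
        omega
      · rfl

-- one pass of A's outer loop (one difference x) equals B's branch for x
theorem pvPerX (x n : Int) (hmin : min 0 n ≤ x) (acc : List (List Int)) :
    ((PySem.List.pyRange 0 (n - x) 1).foldl
      (fun s i => match s.2.get? i with
        | some false => (s.1 ++ [[i, i + x]], (s.2.insert i true).insert (i + x) true)
        | _ => s) (acc, resetStimUsedP n)).1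
    = if x = 0 then acc ++ (PySem.List.pyRange 0 n 1).map (fun i => [i, i])
      else if 0 < x then
        acc ++ ((PySem.List.pyRange 0 (n - x) 1).filter
                  (fun i => decide (PySem.Int.mod i (2 * x) < x))).map (fun i => [i, i + x])
      else acc := by
  by_cases hx0 : x = 0
  · subst hx0
    rw [if_pos rfl]
    rcases lt_or_ge 0 n with h | h
    · have hn : n - 0 = ((n.toNat : Nat) : Int) := by omega
      obtain ⟨d', hfold, -⟩ := pvInnerZero n acc n.toNat (by omega)
      rw [hn, hfold]
      have : n = ((n.toNat : Nat) : Int) := by omega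
      rw [this]
      simp
    · rw [show n - 0 = n by ring, PySem.List.pyRange_one_eq_nil h]
      simp
  · rw [if_neg hx0]
    by_cases hx : 0 < x
    · rw [if_pos hx]
      rcases lt_or_ge 0 (n - x) with h | h
      · have hn : n - x = (((n - x).toNat : Nat) : Int) := by omega
        obtain ⟨d', hfold, -⟩ := pvInnerPos x n hx acc (n - x).toNat (by omega)
        rw [hn, hfold]
        have hfc : ∀ i : Int, (decide (PySem.Int.mod i (2 * x) < x)) = (decide (i % (2 * x) < x)) := by
          intro i
          rw [PySem.Int.mod_eq_emod_of_pos (by omega)]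
        simp only [hfc]
      · rw [PySem.List.pyRange_one_eq_nil h]
        simp
    · rw [if_neg hx]
      have h : n - x ≤ 0 := by omega
      rw [PySem.List.pyRange_one_eq_nil h]
      rfl

-- A's outer loop equals B's outer loop for any accumulator
theorem pvMain (n : Int) : ∀ (pd : List Int) (acc : List (List Int)), (∀ x ∈ pd, min 0 n ≤ x) →
    pd.foldl (fun pairingIndices x =>
      ((PySem.List.pyRange 0 (n - x) 1).foldl
        (fun s i => match s.2.get? i with
          | some false => (s.1 ++ [[i, i + x]], (s.2.insert i true).insert (i + x) true)
          | _ => s) (pairingIndices, resetStimUsedP n)).1) acc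
    = pd.foldl (fun out x =>
        if x = 0 then out ++ (PySem.List.pyRange 0 n 1).map (fun i => [i, i])
        else if 0 < x then
          out ++ ((PySem.List.pyRange 0 (n - x) 1).filter
                    (fun i => decide (PySem.Int.mod i (2 * x) < x))).map (fun i => [i, i + x])
        else out) acc := by
  intro pd
  induction pd with
  | nil => intro acc _; rfl
  | cons y t ih =>
    intro acc hpre
    simp only [List.foldl_cons]
    rw [pvPerX y n (hpre y (by simp)) acc]
    exact ih _ (fun x hx => hpre x (by simp [hx]))

-- ===== VERDICT (by name: the statement is the Claim_ definition above) =====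
theorem get_pairingIndices_spec : Claim_equal_get_pairingIndices := by
  intro pd n _ hpre
  unfold Spec_get_pairingIndices get_pairingIndices get_pairingIndices_alt
  exact pvMain n pd [] hpre
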